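-- pv_equiv track=rewrite | github.com/amichayfeldman/SpamAgent | src/agents/base_agent.py | validate_parentheses
-- ===== SOURCE A (Python) =====
-- def validate_parentheses(text):
--     if not text:
--         return text
--
--     stack = []
--     for char in text:
--         if char == '{':
--             stack.append(char)
--         elif char == '}':
--             if stack and stack[-1] == '{':
--                 stack.pop()
--             else:
--                 pass
--
--     # Add missing closing parentheses
--     result = text
--     for _ in range(len(stack)):
--         result += '}'
--
--     return result
-- ===== SOURCE B (Python) =====
-- def validate_parentheses(text):
--     if not text:
--         return text
--     pending = 0    # '}' seen to the right that can still match an '{'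
--     unmatched = 0  # '{' with no matching '}' to their right
--     for ch in reversed(text):
--         if ch == '}':
--             pending += 1
--         elif ch == '{':
--             if pending:
--                 pending -= 1
--             else:
--                 unmatched += 1
--     return text + '}' * unmatched
-- ===== Notes on version B (the rewrite author's own statement) =====
-- stated objective: alternative
-- what changed: Replaces the forward stack pass with a single right-to-left scan keeping two counters (pending closers, unmatched opens), using O(1) extra space instead of a stack.
import Mathlib
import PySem

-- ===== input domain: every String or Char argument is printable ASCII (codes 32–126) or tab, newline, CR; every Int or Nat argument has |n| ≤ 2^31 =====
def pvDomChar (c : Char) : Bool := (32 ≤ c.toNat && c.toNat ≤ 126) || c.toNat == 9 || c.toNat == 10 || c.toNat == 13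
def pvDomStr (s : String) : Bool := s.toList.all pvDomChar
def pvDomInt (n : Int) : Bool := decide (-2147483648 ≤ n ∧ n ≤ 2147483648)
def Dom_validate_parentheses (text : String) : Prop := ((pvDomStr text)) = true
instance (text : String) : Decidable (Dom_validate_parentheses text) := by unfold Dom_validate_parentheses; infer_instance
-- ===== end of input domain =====

-- B replaces A's forward stack pass by a single right-to-left scan with two counters (alternative, same return value).

-- ===== PORT A =====
-- one step of A's loop: push '{', pop on '}' when the stack top is '{'
def pvStackStep (st : List Char) (c : Char) : List Char :=
  if c = '{' then st ++ ['{']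
  else if c = '}' then
    (if st ≠ [] ∧ st.getLast? = some '{' then st.dropLast else st)
  else st

def validate_parentheses (text : String) : String :=
  if text = "" then text
  else
    let stack := text.toList.foldl pvStackStep []
    (List.range stack.length).foldl (fun r _ => r ++ "}") text

-- ===== PORT B =====
-- one step of B's reversed loop on (pending, unmatched)
def pvRevStep (pu : Nat × Nat) (c : Char) : Nat × Nat :=
  if c = '}' then (pu.1 + 1, pu.2)
  else if c = '{' then
    (if pu.1 ≠ 0 then (pu.1 - 1, pu.2) else (pu.1, pu.2 + 1))
  else pu

def validate_parentheses_alt (text : String) : String :=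
  if text = "" then text
  else
    let pu := text.toList.reverse.foldl pvRevStep (0, 0)
    text ++ String.ofList (List.replicate pu.2 '}')

-- ===== PRECONDITION & SPEC =====
def Spec_validate_parentheses (text : String) (out : String) : Prop := out = validate_parentheses_alt text
instance (text : String) (out : String) : Decidable (Spec_validate_parentheses text out) := by unfold Spec_validate_parentheses; infer_instance

-- ===== CLAIM (what is proved, stated in full; the proofs are below) =====
def Claim_equal_validate_parentheses : Prop := ∀ (text : String), Dom_validate_parentheses text → Spec_validate_parentheses text (validate_parentheses text)

-- ===== LEMMAS AND PROOFS =====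

-- numeric abstraction of A's stack length
def pvLf (n : Nat) : List Char → Nat
  | [] => n
  | c :: t => pvLf (if c = '{' then n + 1 else if c = '}' then n - 1 else n) t

-- A's stack is always a block of '{'s; its length evolves as pvLf
theorem pvStack_replicate (l : List Char) (n : Nat) :
    l.foldl pvStackStep (List.replicate n '{') = List.replicate (pvLf n l) '{' := by
  induction l generalizing n with
  | nil => simp [pvLf]
  | cons c t ih =>
    simp only [List.foldl, pvLf]
    rw [show pvStackStep (List.replicate n '{') c
          = List.replicate (if c = '{' then n + 1 else if c = '}' then n - 1 else n) '{' from ?_,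
        ih]
    unfold pvStackStep
    split_ifs with h1 h2 h3
    · simp [List.replicate_succ']
    · cases n with
      | zero => simp at h3
      | succ m => simp [List.replicate_succ']
    · cases n with
      | zero => rfl
      | succ m => exact absurd ⟨by simp, by simp [List.replicate_succ']⟩ h3
    · rfl

-- appending '}' len(stack) times is appending a replicate block
theorem pvAppend_range (t : String) (k : Nat) :
    (List.range k).foldl (fun r _ => r ++ "}") t = t ++ String.ofList (List.replicate k '}') := by
  induction k with
  | zero => simp
  | succ m ih =>
    rw [List.range_succ, List.foldl_append, ih]
    simp only [List.foldl, List.replicate_succ']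
    rw [String.append_assoc]
    congr 1
    rw [show ("}" : String) = String.ofList ['}'] from rfl, ← String.ofList_append]

-- foldr form of B's reversed loop
def pvRf (l : List Char) : Nat × Nat := l.foldr (fun c pu => pvRevStep pu c) (0, 0)

-- the key invariant connecting the left scan to the right scan
theorem pvLf_Rf (l : List Char) (n : Nat) : pvLf n l = (n - (pvRf l).1) + (pvRf l).2 := by
  induction l generalizing n with
  | nil => simp [pvLf, pvRf]
  | cons c t ih =>
    have h1 : pvRf (c :: t) = pvRevStep (pvRf t) c := rfl
    rw [show pvLf n (c :: t)
          = pvLf (if c = '{' then n + 1 else if c = '}' then n - 1 else n) t from rfl, ih, h1]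
    rcases pvRf t with ⟨p, u⟩
    unfold pvRevStep
    dsimp only
    split_ifs <;> dsimp only <;> first | omega | simp_all

-- ===== VERDICT (by name: the statement is the Claim_ definition above) =====
theorem validate_parentheses_spec : Claim_equal_validate_parentheses := by
  intro text _
  unfold Spec_validate_parentheses validate_parentheses validate_parentheses_alt
  by_cases h : text = ""
  · simp [h]
  · simp only [h, if_false]
    have hs := pvStack_replicate text.toList 0
    simp only [List.replicate_zero] at hs
    rw [hs, List.length_replicate, pvAppend_range]
    rw [List.foldl_reverse]
    have := pvLf_Rf text.toList 0
    simp only [Nat.zero_sub, Nat.zero_add] at this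
    rw [show (text.toList.foldr (fun x y => pvRevStep y x) (0, 0)) = pvRf text.toList from rfl]
    rw [← this]
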